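-- pv_equiv track=rewrite | github.com/mutl3y/ansible_role_doc | src/prism/scanner_readme/notes_renderer.py | render_role_notes_section
-- ===== SOURCE A (Python) =====
-- def render_role_notes_section(role_notes: dict | None) -> str:
--     """Render comment-driven role notes in a readable markdown block."""
--     notes = role_notes or {}
--     warnings = notes.get("warnings") or []
--     deprecations = notes.get("deprecations") or []
--     general = notes.get("notes") or []
--     additionals = notes.get("additionals") or []
--     if not warnings and not deprecations and not general and not additionals:
--         return "No role notes were found in comment annotations."
--
--     lines: list[str] = []
--     if warnings:
--         lines.append("Warnings:")
--         lines.extend(f"- {item}" for item in warnings)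
--     if deprecations:
--         if lines:
--             lines.append("")
--         lines.append("Deprecations:")
--         lines.extend(f"- {item}" for item in deprecations)
--     if general:
--         if lines:
--             lines.append("")
--         lines.append("Notes:")
--         lines.extend(f"- {item}" for item in general)
--     if additionals:
--         if lines:
--             lines.append("")
--         lines.append("Additionals:")
--         lines.extend(f"- {item}" for item in additionals)
--     return "\n".join(lines)
-- ===== SOURCE B (Python) =====
-- def render_role_notes_section(role_notes: dict | None) -> str:
--     """Render comment-driven role notes in a readable markdown block."""
--     notes = role_notes or {}
--     sections = [
--         ("Warnings:", notes.get("warnings") or []),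
--         ("Deprecations:", notes.get("deprecations") or []),
--         ("Notes:", notes.get("notes") or []),
--         ("Additionals:", notes.get("additionals") or []),
--     ]
--     blocks = [
--         "\n".join([label] + [f"- {item}" for item in items])
--         for label, items in sections
--         if items
--     ]
--     if not blocks:
--         return "No role notes were found in comment annotations."
--     return "\n\n".join(blocks)
-- ===== Notes on version B (the rewrite author's own statement) =====
-- stated objective: simpler
-- what changed: Replaces A's four unrolled if-blocks with running 'insert blank line if lines is non-empty' bookkeeping by a single table-driven pass that builds one block string per non-empty section and joins the blocks with '\n\n'.
import Mathlib
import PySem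

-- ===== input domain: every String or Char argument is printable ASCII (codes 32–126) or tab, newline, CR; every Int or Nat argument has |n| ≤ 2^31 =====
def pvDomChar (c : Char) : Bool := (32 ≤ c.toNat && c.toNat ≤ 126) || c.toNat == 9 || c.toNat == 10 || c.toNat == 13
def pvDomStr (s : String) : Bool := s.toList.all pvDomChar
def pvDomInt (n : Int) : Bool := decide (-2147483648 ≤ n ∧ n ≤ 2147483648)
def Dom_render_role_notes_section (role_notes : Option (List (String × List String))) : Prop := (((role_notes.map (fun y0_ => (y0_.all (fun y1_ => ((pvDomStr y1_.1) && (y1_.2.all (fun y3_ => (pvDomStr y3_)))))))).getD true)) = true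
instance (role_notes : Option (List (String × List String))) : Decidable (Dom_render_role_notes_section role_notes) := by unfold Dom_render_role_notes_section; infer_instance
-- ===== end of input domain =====

-- B replaces A's four unrolled if-blocks and running blank-line bookkeeping with one
-- table-driven pass: build per-section blocks and join them with "\n\n" (objective: simpler).

-- ===== PORT A =====
def render_role_notes_section (role_notes : Option (List (String × List String))) : String :=
  let notes := role_notes.getD []            -- role_notes or {}
  let warnings := PySem.Dict.getD (PySem.Dict.mk notes) "warnings" []          -- .get(..) or []
  let deprecations := PySem.Dict.getD (PySem.Dict.mk notes) "deprecations" []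
  let general := PySem.Dict.getD (PySem.Dict.mk notes) "notes" []
  let additionals := PySem.Dict.getD (PySem.Dict.mk notes) "additionals" []
  if warnings.isEmpty && deprecations.isEmpty && general.isEmpty && additionals.isEmpty then
    "No role notes were found in comment annotations."
  else
    let lines : List String := []
    let lines := if !warnings.isEmpty then
        lines ++ "Warnings:" :: warnings.map (fun item => "- " ++ item)
      else lines
    let lines := if !deprecations.isEmpty then
        (if !lines.isEmpty then lines ++ [""] else lines) ++
          "Deprecations:" :: deprecations.map (fun item => "- " ++ item)
      else lines
    let lines := if !general.isEmpty then
        (if !lines.isEmpty then lines ++ [""] else lines) ++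
          "Notes:" :: general.map (fun item => "- " ++ item)
      else lines
    let lines := if !additionals.isEmpty then
        (if !lines.isEmpty then lines ++ [""] else lines) ++
          "Additionals:" :: additionals.map (fun item => "- " ++ item)
      else lines
    PySem.Str.join "\n" lines

-- ===== PORT B =====
def render_role_notes_section_alt (role_notes : Option (List (String × List String))) : String :=
  let notes := role_notes.getD []            -- role_notes or {}
  let sections : List (String × List String) :=
    [("Warnings:", PySem.Dict.getD (PySem.Dict.mk notes) "warnings" []),
     ("Deprecations:", PySem.Dict.getD (PySem.Dict.mk notes) "deprecations" []),
     ("Notes:", PySem.Dict.getD (PySem.Dict.mk notes) "notes" []),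
     ("Additionals:", PySem.Dict.getD (PySem.Dict.mk notes) "additionals" [])]
  let blocks := (sections.filter (fun p => !p.2.isEmpty)).map
    (fun p => PySem.Str.join "\n" (p.1 :: p.2.map (fun item => "- " ++ item)))
  if blocks.isEmpty then "No role notes were found in comment annotations."
  else PySem.Str.join "\n\n" blocks

-- ===== PRECONDITION & SPEC =====
def Spec_render_role_notes_section (role_notes : Option (List (String × List String))) (out : String) : Prop := out = render_role_notes_section_alt role_notes
instance (role_notes : Option (List (String × List String))) (out : String) : Decidable (Spec_render_role_notes_section role_notes out) := by unfold Spec_render_role_notes_section; infer_instance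

-- ===== CLAIM (what is proved, stated in full; the proofs are below) =====
def Claim_equal_render_role_notes_section : Prop := ∀ (role_notes : Option (List (String × List String))), Dom_render_role_notes_section role_notes → Spec_render_role_notes_section role_notes (render_role_notes_section role_notes)

-- ===== LEMMAS AND PROOFS =====

-- A's running "lines" loop, written as one recursion over the (label, items) table.
def pvALines : List (String × List String) → List String → List String
  | [], lines => lines
  | (lab, items) :: rest, lines =>
      pvALines rest
        (if !items.isEmpty then
          (if !lines.isEmpty then lines ++ [""] else lines) ++
            lab :: items.map (fun item => "- " ++ item)
        else lines)

-- B's blocks, before joining each with "\n".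
def pvBlocksOf (sections : List (String × List String)) : List (List String) :=
  (sections.filter (fun p => !p.2.isEmpty)).map
    (fun p => p.1 :: p.2.map (fun item => "- " ++ item))

theorem pv_inter_cc {α : Type} (sep a b : List α) (r : List (List α)) :
    List.intercalate sep (a :: b :: r) = a ++ sep ++ List.intercalate sep (b :: r) := by
  simp [List.intercalate, List.intersperse]

theorem pv_inter_append {α : Type} (sep : List α) (xs : List (List α)) (y : List α)
    (ys : List (List α)) (h : xs ≠ []) :
    List.intercalate sep (xs ++ y :: ys) =
      List.intercalate sep xs ++ sep ++ List.intercalate sep (y :: ys) := by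
  induction xs with
  | nil => simp at h
  | cons x xs ih =>
    cases xs with
    | nil => simp [List.intercalate]
    | cons x' t =>
      have hih := ih (by simp)
      simp only [List.cons_append] at hih ⊢
      rw [pv_inter_cc, hih, pv_inter_cc]
      simp [List.append_assoc]

theorem pv_inter_ne_nil {α : Type} (sep : List α) (b : List α) (r : List (List α))
    (hb : b ≠ []) : List.intercalate sep (b :: r) ≠ [] := by
  cases r with
  | nil => simpa [List.intercalate] using hb
  | cons c t => rw [pv_inter_cc]; simp [hb]

theorem pv_map_intercalate {α β : Type} (g : α → β) (sep : List α) (l : List (List α)) :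
    List.map g (List.intercalate sep l) =
      List.intercalate (sep.map g) (l.map (List.map g)) := by
  induction l with
  | nil => simp [List.intercalate]
  | cons b r ih =>
    cases r with
    | nil => simp [List.intercalate]
    | cons c t =>
      have ih' := ih
      simp only [List.map_cons] at ih'
      rw [pv_inter_cc]
      simp only [List.map_cons]
      rw [pv_inter_cc, ← ih']
      simp [List.map_append]

-- blank-line-separated lines joined by sep = blocks joined by sep ++ sep
theorem pv_key_inter {α : Type} (sep : List α) (l : List (List (List α)))
    (h : ∀ b ∈ l, b ≠ []) :
    List.intercalate sep (List.intercalate [[]] l) =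
      List.intercalate (sep ++ sep) (l.map (List.intercalate sep)) := by
  induction l with
  | nil => simp [List.intercalate]
  | cons b r ih =>
    cases r with
    | nil => simp [List.intercalate]
    | cons c t =>
      have hb : b ≠ [] := h b (by simp)
      have hc : c ≠ [] := h c (by simp)
      rw [pv_inter_cc]
      have hre : b ++ [[]] ++ List.intercalate [[]] (c :: t) =
          b ++ ([] : List α) :: List.intercalate [[]] (c :: t) := by
        simp
      rw [hre, pv_inter_append sep b ([] : List α) _ hb]
      have hM : List.intercalate [[]] (c :: t) ≠ [] := pv_inter_ne_nil _ _ _ hc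
      obtain ⟨m0, mt, hm⟩ := List.exists_cons_of_ne_nil hM
      rw [hm, pv_inter_cc, ← hm, ih (fun x hx => h x (by simp [hx]))]
      simp only [List.map_cons]
      rw [pv_inter_cc]
      simp [List.append_assoc]

-- String-level form of pv_key_inter.
theorem pv_key_str (l : List (List String)) (h : ∀ b ∈ l, b ≠ []) :
    PySem.Str.join "\n" (List.intercalate [""] l) =
      PySem.Str.join "\n\n" (l.map (PySem.Str.join "\n")) := by
  unfold PySem.Str.join
  congr 1
  have h1 : List.map String.toList (List.intercalate [""] l) =
      List.intercalate [[]] (l.map (List.map String.toList)) := by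
    simpa using pv_map_intercalate String.toList [""] l
  rw [PySem.Chars.join, PySem.Chars.join, h1]
  have h2 : ∀ b ∈ l.map (List.map String.toList), b ≠ [] := by
    intro b hb
    simp only [List.mem_map] at hb
    obtain ⟨x, hx, rfl⟩ := hb
    simp [h x hx]
  rw [pv_key_inter ("\n".toList) _ h2]
  have : ("\n\n".toList : List Char) = "\n".toList ++ "\n".toList := by decide
  rw [this]
  simp only [List.map_map]
  exact congrArg (List.intercalate _) (List.map_congr_left (fun x hx => by
    simp [Function.comp, PySem.Chars.join]))

-- A's loop maintains: lines = blank-line-intercalation of the blocks emitted so far.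
theorem pv_alines_spec (sections : List (String × List String)) :
    ∀ (acc : List (List String)), (∀ b ∈ acc, b ≠ []) →
    pvALines sections (List.intercalate [""] acc) =
      List.intercalate [""] (acc ++ pvBlocksOf sections) := by
  induction sections with
  | nil => intro acc _; simp [pvALines, pvBlocksOf]
  | cons s rest ih =>
    intro acc hacc
    obtain ⟨lab, items⟩ := s
    by_cases hi : items.isEmpty
    · simp only [pvALines, hi, Bool.not_true, Bool.false_eq_true, if_false]
      rw [ih acc hacc]
      simp [pvBlocksOf, hi]
    · simp only [pvALines, hi, Bool.not_false, if_true]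
      have hstep :
          (if !(List.intercalate [""] acc).isEmpty then List.intercalate [""] acc ++ [""]
            else List.intercalate [""] acc) ++
            lab :: items.map (fun item => "- " ++ item) =
          List.intercalate [""] (acc ++ [lab :: items.map (fun item => "- " ++ item)]) := by
        cases acc with
        | nil => simp [List.intercalate]
        | cons b r =>
          have hbne : b ≠ [] := hacc b (by simp)
          have : List.intercalate [""] (b :: r) ≠ [] := pv_inter_ne_nil _ _ _ hbne
          rw [if_pos (by simpa [List.isEmpty_iff] using this)]
          rw [pv_inter_append [""] (b :: r) _ [] (by simp)]
          simp [List.intercalate, List.append_assoc]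
      rw [hstep, ih _ (by
        intro b hb
        rcases List.mem_append.mp hb with h1 | h2
        · exact hacc b h1
        · simp only [List.mem_singleton] at h2; simp [h2])]
      simp [pvBlocksOf, hi, List.append_assoc]

-- Equivalence of the two bodies, over the four extracted item lists.
theorem pv_core (w d g a : List String) :
    (if w.isEmpty && d.isEmpty && g.isEmpty && a.isEmpty then
      "No role notes were found in comment annotations."
    else
      let lines : List String := []
      let lines := if !w.isEmpty then
          lines ++ "Warnings:" :: w.map (fun item => "- " ++ item)
        else lines
      let lines := if !d.isEmpty then
          (if !lines.isEmpty then lines ++ [""] else lines) ++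
            "Deprecations:" :: d.map (fun item => "- " ++ item)
        else lines
      let lines := if !g.isEmpty then
          (if !lines.isEmpty then lines ++ [""] else lines) ++
            "Notes:" :: g.map (fun item => "- " ++ item)
        else lines
      let lines := if !a.isEmpty then
          (if !lines.isEmpty then lines ++ [""] else lines) ++
            "Additionals:" :: a.map (fun item => "- " ++ item)
        else lines
      PySem.Str.join "\n" lines) =
    (let sections : List (String × List String) :=
      [("Warnings:", w), ("Deprecations:", d), ("Notes:", g), ("Additionals:", a)]
    let blocks := (sections.filter (fun p => !p.2.isEmpty)).map
      (fun p => PySem.Str.join "\n" (p.1 :: p.2.map (fun item => "- " ++ item)))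
    if blocks.isEmpty then "No role notes were found in comment annotations."
    else PySem.Str.join "\n\n" blocks) := by
  set S : List (String × List String) :=
    [("Warnings:", w), ("Deprecations:", d), ("Notes:", g), ("Additionals:", a)] with hS
  have hchain :
      (let lines : List String := []
      let lines := if !w.isEmpty then
          lines ++ "Warnings:" :: w.map (fun item => "- " ++ item)
        else lines
      let lines := if !d.isEmpty then
          (if !lines.isEmpty then lines ++ [""] else lines) ++
            "Deprecations:" :: d.map (fun item => "- " ++ item)
        else lines
      let lines := if !g.isEmpty then
          (if !lines.isEmpty then lines ++ [""] else lines) ++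
            "Notes:" :: g.map (fun item => "- " ++ item)
        else lines
      let lines := if !a.isEmpty then
          (if !lines.isEmpty then lines ++ [""] else lines) ++
            "Additionals:" :: a.map (fun item => "- " ++ item)
        else lines
      lines) = pvALines S [] := by
    simp only [hS, pvALines]
    cases hw : w.isEmpty <;> simp
  have hblocks : ∀ b ∈ pvBlocksOf S, b ≠ [] := by
    intro b hb
    simp only [pvBlocksOf, List.mem_map] at hb
    obtain ⟨p, _, rfl⟩ := hb
    simp
  have hmap : (pvBlocksOf S).map (PySem.Str.join "\n") =
      (S.filter (fun p => !p.2.isEmpty)).map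
        (fun p => PySem.Str.join "\n" (p.1 :: p.2.map (fun item => "- " ++ item))) := by
    simp [pvBlocksOf, List.map_map, Function.comp]
  by_cases hg : (w.isEmpty && d.isEmpty && g.isEmpty && a.isEmpty) = true
  · have hbe : pvBlocksOf S = [] := by
      simp only [Bool.and_eq_true] at hg
      obtain ⟨⟨⟨h1, h2⟩, h3⟩, h4⟩ := hg
      simp [pvBlocksOf, hS, List.filter, h1, h2, h3, h4]
    rw [if_pos hg]
    simp only [← hmap, hbe]
    simp
  · have hbne : pvBlocksOf S ≠ [] := by
      simp only [pvBlocksOf, ne_eq, List.map_eq_nil_iff, List.filter_eq_nil_iff, hS]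
      intro hall
      apply hg
      simp only [Bool.and_eq_true]
      have h1 := hall ("Warnings:", w) (by simp)
      have h2 := hall ("Deprecations:", d) (by simp)
      have h3 := hall ("Notes:", g) (by simp)
      have h4 := hall ("Additionals:", a) (by simp)
      simp at h1 h2 h3 h4
      exact ⟨⟨⟨by simp [h1], by simp [h2]⟩, by simp [h3]⟩, by simp [h4]⟩
    rw [if_neg hg]
    simp only [hchain]
    have halines : pvALines S [] = List.intercalate [""] (pvBlocksOf S) := by
      have h := pv_alines_spec S [] (by simp)
      simpa [List.intercalate] using h
    rw [halines, pv_key_str _ hblocks, hmap]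
    rw [if_neg (by simpa [List.isEmpty_iff, ← hmap] using hbne)]

-- ===== VERDICT (by name: the statement is the Claim_ definition above) =====
theorem render_role_notes_section_spec : Claim_equal_render_role_notes_section := by
  intro rn _
  unfold Spec_render_role_notes_section render_role_notes_section render_role_notes_section_alt
  exact pv_core _ _ _ _
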